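-- pv_equiv track=rewrite | github.com/danieleschmidt/docker-optimizer-agent | src/docker_optimizer/registry_integration.py | _extract_base_image
-- ===== SOURCE A (Python) =====
-- from typing import Dict, List, Optional
--
-- def _extract_base_image(dockerfile_content: str) -> Optional[str]:
--     """Extract the base image from Dockerfile content.
--
--     Args:
--         dockerfile_content: Content of the Dockerfile
--
--     Returns:
--         Base image name or None if not found
--     """
--     lines = dockerfile_content.strip().split('\n')
--     for line in lines:
--         line = line.strip()
--         if line.upper().startswith('FROM '):
--             # Extract the image name (remove FROM and any AS alias)
--             parts = line.split()
--             if len(parts) >= 2: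
--                 base_image = parts[1]
--                 # Remove any AS alias
--                 if ' AS ' in line.upper():
--                     base_image = base_image.split()[0]
--                 return base_image
--     return None
-- ===== SOURCE B (Python) =====
-- def _try_from_here(s, i):
--     """If a 'FROM <image>' directive starts at position i, return its image token, else None."""
--     n = len(s)
--     if not (i + 4 < n and s[i:i + 4].upper() == 'FROM' and s[i + 4] == ' '):
--         return None
--     j = i + 5
--     while j < n and s[j] != '\n' and s[j].isspace():
--         j += 1
--     if j >= n or s[j] == '\n':
--         return None
--     w = []
--     k = j
--     while k < n and not s[k].isspace():
--         w.append(s[k])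
--         k += 1
--     return ''.join(w)
--
--
-- def _extract_base_image(dockerfile_content: str):
--     """Extract the base image from Dockerfile content.
--
--     Character-level scan: walk the raw string once with an index, per line skip
--     the indentation, try to read a FROM directive in place, else jump past the
--     next newline. No intermediate line list or stripped copies are built.
--     """
--     s = dockerfile_content
--     n = len(s)
--     i = 0
--     while i < n:
--         while i < n and s[i] != '\n' and s[i].isspace():
--             i += 1
--         img = _try_from_here(s, i)
--         if img is not None:
--             return img
--         while i < n and s[i] != '\n':
--             i += 1
--         i += 1
--     return None
-- ===== Notes on version B (the rewrite author's own statement) =====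
-- stated objective: alternative
-- what changed: A builds a stripped copy, splits it into a line list and re-strips and re-splits each line; B is an index-driven character scanner over the raw string that per line skips indentation, attempts to read the FROM directive in place and otherwise jumps past the next newline, building no intermediate lists or stripped copies.
import Mathlib
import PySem

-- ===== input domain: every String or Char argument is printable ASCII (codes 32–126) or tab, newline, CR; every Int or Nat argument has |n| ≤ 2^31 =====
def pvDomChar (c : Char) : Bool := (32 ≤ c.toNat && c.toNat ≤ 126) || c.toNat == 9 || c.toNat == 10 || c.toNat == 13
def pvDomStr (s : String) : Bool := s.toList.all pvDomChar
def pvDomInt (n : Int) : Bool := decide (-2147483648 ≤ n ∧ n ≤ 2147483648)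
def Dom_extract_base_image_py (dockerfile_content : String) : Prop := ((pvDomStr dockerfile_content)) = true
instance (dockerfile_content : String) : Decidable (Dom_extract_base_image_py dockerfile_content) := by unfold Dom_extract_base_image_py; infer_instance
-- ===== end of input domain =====

-- B replaces A's strip/split-into-lines/re-strip pipeline by an index-style character scanner
-- over the raw string (skip indentation, try the FROM directive in place, jump past the next
-- newline); objective: alternative (same O(n) cost, no intermediate line list).


-- ===== PORT A =====
-- A's `for line in lines:` loop, one constructor per iteration.
def pvLoopA : List String → Option String
  | [] => none
  | l :: rest =>
    let line := PySem.Str.strip l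
    if PySem.Str.startswith (PySem.Str.upper line) "FROM " then
      let parts := PySem.Str.split₀ line
      if 2 ≤ parts.length then
        -- parts[1]: in range here (the guard above holds), so .getD "" is never taken
        let base_image := (PySem.List.pyGet? parts 1).getD ""
        some (if PySem.Str.isIn " AS " (PySem.Str.upper line) then
                -- base_image.split()[0]: split() of a word is nonempty, [0] never raises
                (PySem.List.pyGet? (PySem.Str.split₀ base_image) 0).getD ""
              else base_image)
      else pvLoopA rest
    else pvLoopA rest

def extract_base_image_py (dockerfile_content : String) : Option String :=
  -- s.split('\n') with a nonempty separator never raises: split? is some here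
  pvLoopA ((PySem.Str.split? (PySem.Str.strip dockerfile_content) "\n").getD [])

-- ===== PORT B =====
-- `while i < n and s[i] != '\n' and s[i].isspace(): i += 1` (as the suffix from i)
def pvSkipWS : List Char → List Char
  | [] => []
  | c :: t => if c != '\n' && PySem.Chars.isspace c then pvSkipWS t else c :: t

-- `while i < n and s[i] != '\n': i += 1` followed by `i += 1` (as the suffix from i)
def pvSkipLine : List Char → List Char
  | [] => []
  | c :: t => if c == '\n' then t else pvSkipLine t

-- `while k < n and not s[k].isspace(): w.append(s[k]); k += 1`
def pvToken : List Char → List Char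
  | [] => []
  | c :: t => if PySem.Chars.isspace c then [] else c :: pvToken t

-- `_try_from_here(s, i)` on the suffix of s starting at i
def pvLineTry (s1 : List Char) : Option String :=
  match s1 with
  | a :: b :: c :: d :: e :: t =>
    -- `i + 4 < n and s[i:i+4].upper() == 'FROM' and s[i+4] == ' '`
    if [a, b, c, d].map PySem.Chars.upperChar = ['F', 'R', 'O', 'M'] ∧ e = ' ' then
      match pvSkipWS t with
      | [] => none
      | x :: u => if x == '\n' then none
                  else some (String.ofList (pvToken (x :: u)))
    else none
  | _ => none

-- termination of the outer `while i < n` loop: each iteration moves i past a newline or to n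
theorem pvSkipWS_length_le (s : List Char) : (pvSkipWS s).length ≤ s.length := by
  induction s with
  | nil => simp [pvSkipWS]
  | cons c t ih =>
    simp only [pvSkipWS]
    split
    · exact le_trans ih (by simp)
    · simp

theorem pvSkipLine_length_lt (s : List Char) (h : s ≠ []) : (pvSkipLine s).length < s.length := by
  induction s with
  | nil => exact absurd rfl h
  | cons c t ih =>
    simp only [pvSkipLine]
    split
    · simp
    · rcases t with _ | ⟨d, t'⟩
      · simp [pvSkipLine]
      · exact lt_trans (ih (by simp)) (by simp)

theorem pv_scan_dec (c : Char) (t : List Char) :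
    (pvSkipLine (pvSkipWS (c :: t))).length < (c :: t).length := by
  rcases h : pvSkipWS (c :: t) with _ | ⟨x, u⟩
  · simp [pvSkipLine]
  · calc (pvSkipLine (x :: u)).length < (x :: u).length := pvSkipLine_length_lt _ (by simp)
      _ = (pvSkipWS (c :: t)).length := by rw [h]
      _ ≤ (c :: t).length := pvSkipWS_length_le _

-- the outer `while i < n` loop of B
def pvScan : List Char → Option String
  | [] => none
  | c0 :: t0 =>
    match pvLineTry (pvSkipWS (c0 :: t0)) with
    | some w => some w
    | none => pvScan (pvSkipLine (pvSkipWS (c0 :: t0)))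
termination_by s => s.length
decreasing_by exact pv_scan_dec c0 t0

def extract_base_image_py_alt (dockerfile_content : String) : Option String :=
  pvScan dockerfile_content.toList

-- ===== PRECONDITION & SPEC =====
def Spec_extract_base_image_py (dockerfile_content : String) (out : Option String) : Prop := out = extract_base_image_py_alt dockerfile_content
instance (dockerfile_content : String) (out : Option String) : Decidable (Spec_extract_base_image_py dockerfile_content out) := by unfold Spec_extract_base_image_py; infer_instance

-- ===== CLAIM (what is proved, stated in full; the proofs are below) =====
def Claim_equal_extract_base_image_py : Prop := ∀ (dockerfile_content : String), Dom_extract_base_image_py dockerfile_content → Spec_extract_base_image_py dockerfile_content (extract_base_image_py dockerfile_content)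

-- ===== LEMMAS AND PROOFS =====

-- ---------- A-side groundwork (character/whitespace facts and split() machinery) ----------

-- upperChar only moves lowercase letters, which are not whitespace and stay non-whitespace
theorem pv_isspace_upperChar (c : Char) :
    PySem.Chars.isspace (PySem.Chars.upperChar c) = PySem.Chars.isspace c := by
  unfold PySem.Chars.upperChar
  by_cases hl : PySem.Chars.islower c = true
  · have h : 'a' ≤ c ∧ c ≤ 'z' := by simpa [PySem.Chars.islower] using hl
    have h1 : 97 ≤ c.toNat := by simpa [Char.le_def] using h.1
    have h2 : c.toNat ≤ 122 := by simpa [Char.le_def] using h.2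
    have ht : (Char.ofNat (c.toNat - 32)).toNat = c.toNat - 32 := by
      rw [Char.toNat_ofNat, if_pos]; exact Or.inl (by omega)
    have e1 : PySem.Chars.isspace (Char.ofNat (c.toNat - 32)) = false := by
      simp [PySem.Chars.isspace, ht]; omega
    have e2 : PySem.Chars.isspace c = false := by
      simp [PySem.Chars.isspace]; omega
    simp [hl, e1, e2]
  · simp [hl]

theorem pv_upperChar_eq_space (c : Char) (h : PySem.Chars.upperChar c = ' ') : c = ' ' := by
  unfold PySem.Chars.upperChar at h
  by_cases hl : PySem.Chars.islower c = true
  · exfalso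
    have hc : 'a' ≤ c ∧ c ≤ 'z' := by simpa [PySem.Chars.islower] using hl
    have h1 : 97 ≤ c.toNat := by simpa [Char.le_def] using hc.1
    have h2 : c.toNat ≤ 122 := by simpa [Char.le_def] using hc.2
    have ht : (Char.ofNat (c.toNat - 32)).toNat = c.toNat - 32 := by
      rw [Char.toNat_ofNat, if_pos]; exact Or.inl (by omega)
    simp only [hl, if_true] at h
    have h' := congrArg Char.toNat h
    rw [ht] at h'
    have h32 : (' ').toNat = 32 := by decide
    rw [h32] at h'
    omega
  · simpa [hl] using h

-- split₀.go: the accumulator is only ever prepended to the final result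
theorem pv_go_acc (s : List Char) : ∀ (cur : List Char) (acc : List (List Char)),
    PySem.Chars.split₀.go s cur acc = acc.reverse ++ PySem.Chars.split₀.go s cur [] := by
  induction s with
  | nil =>
    intro cur acc
    simp only [PySem.Chars.split₀.go]
    by_cases h : cur.isEmpty <;> simp [h]
  | cons c rest ih =>
    intro cur acc
    simp only [PySem.Chars.split₀.go]
    by_cases hw : PySem.Chars.isspace c = true
    · by_cases hc : cur.isEmpty
      · simp only [hw, hc, if_true]
        exact ih [] acc
      · simp only [hw, hc, if_true, Bool.false_eq_true, if_false]
        rw [ih [] (cur.reverse :: acc), ih [] [cur.reverse]]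
        simp
    · simp only [hw, Bool.false_eq_true, if_false]
      exact ih (c :: cur) acc

-- consuming a whitespace-free word just accumulates it
theorem pv_go_word (w : List Char) (hw : ∀ c ∈ w, PySem.Chars.isspace c = false) :
    ∀ (t cur : List Char) (acc : List (List Char)),
    PySem.Chars.split₀.go (w ++ t) cur acc = PySem.Chars.split₀.go t (w.reverse ++ cur) acc := by
  induction w with
  | nil => intro t cur acc; simp
  | cons c rest ih =>
    intro t cur acc
    have hc : PySem.Chars.isspace c = false := hw c (by simp)
    simp only [List.cons_append, PySem.Chars.split₀.go, hc, Bool.false_eq_true, if_false]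
    rw [ih (fun d hd => hw d (by simp [hd])) t (c :: cur) acc]
    simp

theorem pv_split₀_single (w : List Char) (hne : w ≠ [])
    (hw : ∀ c ∈ w, PySem.Chars.isspace c = false) : PySem.Chars.split₀ w = [w] := by
  have h1 : PySem.Chars.split₀ w = PySem.Chars.split₀.go (w ++ []) [] [] := by
    simp [PySem.Chars.split₀]
  rw [h1, pv_go_word w hw [] [] []]
  simp [PySem.Chars.split₀.go, List.isEmpty_iff, hne]

-- a nonempty whitespace-free word followed by a whitespace char opens split₀ with that word
theorem pv_split₀_word_ws (w : List Char) (y : Char) (t : List Char) (hne : w ≠ [])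
    (hw : ∀ c ∈ w, PySem.Chars.isspace c = false) (hy : PySem.Chars.isspace y = true) :
    PySem.Chars.split₀ (w ++ y :: t) = w :: PySem.Chars.split₀ t := by
  rw [PySem.Chars.split₀, pv_go_word w hw (y :: t) [] []]
  simp only [PySem.Chars.split₀.go, hy, if_true, List.append_nil]
  rw [if_neg (by simpa [List.isEmpty_iff] using hne)]
  rw [pv_go_acc t [] [w.reverse.reverse]]
  simp [PySem.Chars.split₀]

-- an all-whitespace tail only flushes the current word
theorem pv_go_allws (w : List Char) (hws : ∀ c ∈ w, PySem.Chars.isspace c = true) :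
    ∀ (cur : List Char) (acc : List (List Char)),
    PySem.Chars.split₀.go w cur acc = PySem.Chars.split₀.go [] cur acc := by
  induction w with
  | nil => intro cur acc; rfl
  | cons c rest ih =>
    intro cur acc
    have hc : PySem.Chars.isspace c = true := hws c (by simp)
    have ih' := ih (fun d hd => hws d (by simp [hd]))
    simp only [PySem.Chars.split₀.go, hc, if_true]
    by_cases hcur : cur.isEmpty
    · simp only [hcur, if_true]
      rw [ih' [] acc]
      simp [PySem.Chars.split₀.go]
    · simp only [hcur, Bool.false_eq_true, if_false]
      rw [ih' [] (cur.reverse :: acc)]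
      simp [PySem.Chars.split₀.go]

-- split₀ ignores an all-whitespace suffix
theorem pv_go_ws_suffix (s : List Char) (w : List Char)
    (hws : ∀ c ∈ w, PySem.Chars.isspace c = true) :
    ∀ (cur : List Char) (acc : List (List Char)),
    PySem.Chars.split₀.go (s ++ w) cur acc = PySem.Chars.split₀.go s cur acc := by
  induction s with
  | nil =>
    intro cur acc
    simpa using pv_go_allws w hws cur acc
  | cons c rest ih =>
    intro cur acc
    simp only [List.cons_append, PySem.Chars.split₀.go]
    by_cases hw : PySem.Chars.isspace c = true
    · simp only [hw, if_true]
      by_cases hcur : cur.isEmpty <;> simp only [hcur, if_true, Bool.false_eq_true, if_false] <;> exact ih _ _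
    · simp only [hw, Bool.false_eq_true, if_false]
      exact ih _ _

-- split₀ ignores an all-whitespace prefix
theorem pv_split₀_ws_prefix (w s : List Char) (hws : ∀ c ∈ w, PySem.Chars.isspace c = true) :
    PySem.Chars.split₀ (w ++ s) = PySem.Chars.split₀ s := by
  induction w with
  | nil => simp
  | cons c rest ih =>
    have hc : PySem.Chars.isspace c = true := hws c (by simp)
    have := ih (fun d hd => hws d (by simp [hd]))
    simp only [List.cons_append, PySem.Chars.split₀] at *
    simpa [PySem.Chars.split₀.go, hc] using this

-- ---------- pvLines: the '\n'-splitter behind PySem.Chars.splitOn s ['\n'] ----------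

def pvLines : List Char → List Char → List (List Char)
  | pre, [] => [pre]
  | pre, c :: t => if c = '\n' then pre :: pvLines [] t else pvLines (pre ++ [c]) t

theorem pv_go_split (fuel : Nat) : ∀ (l cur : List Char) (acc : List (List Char)),
    l.length < fuel →
    PySem.Chars.splitOn.go ['\n'] fuel l cur acc = acc.reverse ++ pvLines cur.reverse l := by
  induction fuel with
  | zero => intro l cur acc h; omega
  | succ fuel ih =>
    intro l cur acc h
    match l with
    | [] => simp [PySem.Chars.splitOn.go, pvLines]
    | c :: rest =>
      by_cases hc : c = '\n'
      · subst hc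
        have hpre : ['\n'].isPrefixOf ('\n' :: rest) = true := by simp [List.isPrefixOf]
        simp only [PySem.Chars.splitOn.go, hpre, if_true]
        rw [ih _ _ _ (by simp at h ⊢; omega)]
        simp [pvLines]
      · have hpre : ['\n'].isPrefixOf (c :: rest) = false := by
          simp only [List.isPrefixOf, Bool.and_eq_false_iff, beq_eq_false_iff_ne, ne_eq]
          exact Or.inl fun h' => hc h'.symm
        simp only [PySem.Chars.splitOn.go, hpre, Bool.false_eq_true, if_false]
        rw [ih _ _ _ (by simp at h ⊢; omega)]
        simp [pvLines, hc]

theorem pv_splitOn_nl (s : List Char) :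
    PySem.Chars.splitOn s ['\n'] = pvLines [] s := by
  rw [PySem.Chars.splitOn, pv_go_split (s.length + 1) s [] [] (by omega)]
  simp


theorem pv_dropWhile_idem {α : Type} (p : α → Bool) (l : List α) :
    List.dropWhile p (List.dropWhile p l) = List.dropWhile p l := by
  induction l with
  | nil => rfl
  | cons a l ih =>
    by_cases h : p a = true
    · simp [h, ih]
    · simp [h]

theorem pv_go_ne (s : List Char) : ∀ (cur : List Char) (acc : List (List Char)),
    cur ≠ [] ∨ acc ≠ [] → PySem.Chars.split₀.go s cur acc ≠ [] := by
  induction s with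
  | nil =>
    intro cur acc h
    simp only [PySem.Chars.split₀.go]
    by_cases hc : cur = []
    · rcases h with h | h
      · exact absurd hc h
      · simp [hc, h]
    · simp [List.isEmpty_iff, hc]
  | cons c rest ih =>
    intro cur acc h
    simp only [PySem.Chars.split₀.go]
    by_cases hw : PySem.Chars.isspace c = true
    · by_cases hc : cur.isEmpty
      · have : cur = [] := by simpa [List.isEmpty_iff] using hc
        simp only [hw, hc, if_true]
        rcases h with h | h
        · exact absurd this h
        · exact ih [] acc (Or.inr h)
      · simp only [hw, hc, if_true, Bool.false_eq_true, if_false]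
        exact ih [] _ (Or.inr (by simp))
    · simp only [hw, Bool.false_eq_true, if_false]
      exact ih (c :: cur) acc (Or.inl (by simp))

theorem pv_go_nonempty (s : List Char) : ∀ (cur : List Char) (acc : List (List Char)),
    (∃ c ∈ s, PySem.Chars.isspace c = false) → PySem.Chars.split₀.go s cur acc ≠ [] := by
  induction s with
  | nil => intro _ _ h; simp at h
  | cons c rest ih =>
    intro cur acc h
    simp only [PySem.Chars.split₀.go]
    obtain ⟨d, hd, hdw⟩ := h
    by_cases hw : PySem.Chars.isspace c = true
    · have hdr : d ∈ rest := by
        rcases List.mem_cons.mp hd with h1 | h1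
        · exact absurd (h1 ▸ hw) (by simp [hdw])
        · exact h1
      by_cases hc : cur.isEmpty
      · simp only [hw, hc, if_true]
        exact ih [] acc ⟨d, hdr, hdw⟩
      · simp only [hw, hc, if_true, Bool.false_eq_true, if_false]
        exact ih [] _ ⟨d, hdr, hdw⟩
    · simp only [hw, Bool.false_eq_true, if_false]
      exact pv_go_ne rest (c :: cur) acc (Or.inl (by simp))

-- invariant: every finished word in acc / every char in cur is as split() produces it
theorem pv_go_mem (s : List Char) : ∀ (cur : List Char) (acc : List (List Char)) (w : List Char),
    (∀ v ∈ acc, v ≠ [] ∧ ∀ c ∈ v, PySem.Chars.isspace c = false) →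
    (∀ c ∈ cur, PySem.Chars.isspace c = false) →
    w ∈ PySem.Chars.split₀.go s cur acc →
    w ≠ [] ∧ ∀ c ∈ w, PySem.Chars.isspace c = false := by
  induction s with
  | nil =>
    intro cur acc w hacc hcur hw
    simp only [PySem.Chars.split₀.go] at hw
    by_cases hc : cur = []
    · simp [hc] at hw
      exact hacc w hw
    · simp [List.isEmpty_iff, hc] at hw
      rcases hw with hw | hw
      · exact hacc w hw
      · subst hw
        refine ⟨by simpa using hc, ?_⟩
        intro c hc'
        exact hcur c (by simpa using hc')
  | cons c rest ih =>
    intro cur acc w hacc hcur hw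
    simp only [PySem.Chars.split₀.go] at hw
    by_cases hws : PySem.Chars.isspace c = true
    · by_cases hc : cur = []
      · simp only [hws, List.isEmpty_iff, hc, if_true] at hw
        exact ih [] acc w hacc (by simp) (by simpa [hc] using hw)
      · have hne : cur.isEmpty = false := by simpa [List.isEmpty_iff] using hc
        simp only [hws, hne, if_true, Bool.false_eq_true, if_false] at hw
        refine ih [] _ w ?_ (by simp) hw
        intro v hv
        rcases List.mem_cons.mp hv with h1 | h1
        · subst h1
          exact ⟨by simpa using hc, fun d hd => hcur d (by simpa using hd)⟩
        · exact hacc v h1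
    · simp only [hws, Bool.false_eq_true, if_false] at hw
      refine ih (c :: cur) acc w hacc ?_ hw
      intro d hd
      rcases List.mem_cons.mp hd with h1 | h1
      · subst h1; simpa using hws
      · exact hcur d h1

-- every word of s.split() is nonempty and whitespace-free
theorem pv_split₀_mem (s w : List Char) (hw : w ∈ PySem.Chars.split₀ s) :
    w ≠ [] ∧ ∀ c ∈ w, PySem.Chars.isspace c = false :=
  pv_go_mem s [] [] w (by simp) (by simp) (by simpa [PySem.Chars.split₀] using hw)

-- a stripped line whose upper-cased form starts with 'FROM ' splits into >= 2 words
theorem pv_key_len (s : List Char)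
    (hstrip : List.dropWhile PySem.Chars.isspace s.reverse = s.reverse)
    (hpre : "FROM ".toList <+: PySem.Chars.upper s) :
    2 ≤ (PySem.Chars.split₀ s).length := by
  rw [show "FROM ".toList = ['F','R','O','M',' '] from rfl] at hpre
  match s, hstrip, hpre with
  | [], _, hpre => simp [PySem.Chars.upper] at hpre
  | [a], _, hpre => simp [PySem.Chars.upper, List.cons_prefix_cons] at hpre
  | [a,b], _, hpre => simp [PySem.Chars.upper, List.cons_prefix_cons] at hpre
  | [a,b,c0], _, hpre => simp [PySem.Chars.upper, List.cons_prefix_cons] at hpre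
  | [a,b,c0,d], _, hpre => simp [PySem.Chars.upper, List.cons_prefix_cons] at hpre
  | (a :: b :: c0 :: d :: e :: t), hstrip, hpre =>
    simp only [PySem.Chars.upper, List.map_cons, List.cons_prefix_cons] at hpre
    obtain ⟨h1, h2, h3, h4, h5, -⟩ := hpre
    have he : e = ' ' := pv_upperChar_eq_space e h5.symm
    have ha : PySem.Chars.isspace a = false := by
      rw [← pv_isspace_upperChar a, ← h1]; decide
    have hb : PySem.Chars.isspace b = false := by
      rw [← pv_isspace_upperChar b, ← h2]; decide
    have hc : PySem.Chars.isspace c0 = false := by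
      rw [← pv_isspace_upperChar c0, ← h3]; decide
    have hd : PySem.Chars.isspace d = false := by
      rw [← pv_isspace_upperChar d, ← h4]; decide
    subst he
    rw [List.dropWhile_eq_self_iff] at hstrip
    rcases ht : t.reverse with _ | ⟨z, zs⟩
    · exfalso
      have ht0 : t = [] := by simpa using congrArg List.reverse ht
      subst ht0
      have := hstrip (by simp)
      simp [PySem.Chars.isspace] at this
    · have hrev : (a :: b :: c0 :: d :: ' ' :: t).reverse = z :: (zs ++ [' ', d, c0, b, a]) := by
        simp [ht]
      have hz : PySem.Chars.isspace z = false := by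
        have := hstrip (by simp)
        simp only [hrev, List.getElem_cons_zero] at this
        simpa using this
      have hzt : z ∈ t := by
        have : z ∈ t.reverse := by rw [ht]; simp
        simpa using this
      have hword : ∀ x ∈ [a,b,c0,d], PySem.Chars.isspace x = false := by
        intro x hx
        simp only [List.mem_cons, List.not_mem_nil, or_false] at hx
        rcases hx with rfl | rfl | rfl | rfl
        · exact ha
        · exact hb
        · exact hc
        · exact hd
      have hsplit : PySem.Chars.split₀ (a :: b :: c0 :: d :: ' ' :: t)
          = [a,b,c0,d] :: PySem.Chars.split₀ t := by
        have e1 : (a :: b :: c0 :: d :: ' ' :: t) = [a,b,c0,d] ++ (' ' :: t) := by simp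
        rw [e1, pv_split₀_word_ws [a,b,c0,d] ' ' t (by simp) hword (by decide)]
      rw [hsplit]
      have hne : PySem.Chars.split₀ t ≠ [] :=
        pv_go_nonempty t [] [] ⟨z, hzt, hz⟩
      have : 0 < (PySem.Chars.split₀ t).length := List.length_pos_iff.mpr hne
      simp only [List.length_cons]
      omega

-- A's per-line test re-read as a condition on the first five characters
theorem pv_cond_eq (s : String) :
    PySem.Str.startswith (PySem.Str.upper s) "FROM " =
    (PySem.Str.upper (PySem.Str.slice s none (some 5)) == "FROM ") := by
  rw [Bool.eq_iff_iff]
  rw [beq_iff_eq, PySem.Str.startswith_eq, PySem.Str.toList_upper, PySem.Chars.startswith_iff]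
  rw [← String.toList_inj, PySem.Str.toList_upper, PySem.Str.toList_slice,
      PySem.Chars.slice_eq_listSlice,
      PySem.List.slice_to (xs := s.toList) (b := 5) (by norm_num),
      show ((5:Int).toNat) = 5 from rfl]
  unfold PySem.Chars.upper
  have hmt : List.map PySem.Chars.upperChar (List.take 5 s.toList)
      = List.take 5 (List.map PySem.Chars.upperChar s.toList) := by
    simp [List.map_take]
  rw [hmt]
  constructor
  · intro h
    have h2 := List.prefix_iff_eq_take.mp h
    rw [show ("FROM ".toList).length = 5 from rfl] at h2
    exact h2.symm
  · intro h
    apply List.prefix_iff_eq_take.mpr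
    rw [show ("FROM ".toList).length = 5 from rfl]
    exact h.symm

-- the strip result never ends in whitespace
theorem pv_strip_no_trail (l : String) :
    List.dropWhile PySem.Chars.isspace ((PySem.Str.strip l).toList).reverse
      = ((PySem.Str.strip l).toList).reverse := by
  rw [PySem.Str.toList_strip]
  unfold PySem.Chars.strip PySem.Chars.rstrip
  rw [List.reverse_reverse]
  exact pv_dropWhile_idem _ _

-- A's loop, normalised: first line whose strip upper-starts with 'FROM ', second word
set_option maxHeartbeats 1000000 in
theorem pv_loop_eq (lines : List String) :
    pvLoopA lines = (lines.map PySem.Str.strip).findSome?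
      (fun line =>
        if PySem.Str.upper (PySem.Str.slice line none (some 5)) == "FROM " then
          some ((PySem.List.pyGet? (PySem.Str.split₀ line) 1).getD "")
        else none) := by
  induction lines with
  | nil => simp [pvLoopA]
  | cons l rest ih =>
    simp only [pvLoopA, List.map_cons, List.findSome?_cons]
    by_cases hb : (PySem.Str.upper (PySem.Str.slice (PySem.Str.strip l) none (some 5)) == "FROM ") = true
    · have ha : PySem.Str.startswith (PySem.Str.upper (PySem.Str.strip l)) "FROM " = true := by
        rw [pv_cond_eq]; exact hb
      have hpre : "FROM ".toList <+: PySem.Chars.upper (PySem.Str.strip l).toList := by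
        have h' := ha
        rw [PySem.Str.startswith_eq, PySem.Str.toList_upper] at h'
        exact (PySem.Chars.startswith_iff _ _).mp h'
      have hlen2 : 2 ≤ (PySem.Chars.split₀ (PySem.Str.strip l).toList).length :=
        pv_key_len _ (pv_strip_no_trail l) hpre
      have hlenS : 2 ≤ (PySem.Str.split₀ (PySem.Str.strip l)).length := by
        have h2 := congrArg List.length (PySem.Str.split₀_map_toList (PySem.Str.strip l))
        rw [List.length_map] at h2
        omega
      have h1lt : 1 < (PySem.Str.split₀ (PySem.Str.strip l)).length := hlenS
      obtain ⟨b1, hb1⟩ : ∃ b1, PySem.List.pyGet? (PySem.Str.split₀ (PySem.Str.strip l)) 1 = some b1 := by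
        rw [PySem.List.pyGet?_ofNat']
        exact ⟨_, List.getElem?_eq_getElem h1lt⟩
      have hmem : b1 ∈ PySem.Str.split₀ (PySem.Str.strip l) := by
        rw [PySem.List.pyGet?_ofNat'] at hb1
        exact List.mem_of_getElem? hb1
      have hmemc : b1.toList ∈ PySem.Chars.split₀ (PySem.Str.strip l).toList := by
        rw [← PySem.Str.split₀_map_toList]
        exact List.mem_map_of_mem hmem
      obtain ⟨hne, hnws⟩ := pv_split₀_mem _ _ hmemc
      have hsingleS : PySem.Str.split₀ b1 = [b1] := by
        apply List.map_injective_iff.mpr (fun a b hab => String.toList_inj.mp hab)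
        rw [PySem.Str.split₀_map_toList, pv_split₀_single _ hne hnws]
        simp
      simp only [ha, if_true]
      rw [if_pos hlenS]
      simp only [hb, if_true]
      rw [hb1]
      simp only [Option.getD_some]
      rw [hsingleS]
      rw [show PySem.List.pyGet? [b1] 0 = some b1 by rw [PySem.List.pyGet?_ofNat']; rfl]
      simp only [Option.getD_some, ite_self]
    · have ha : PySem.Str.startswith (PySem.Str.upper (PySem.Str.strip l)) "FROM " = false := by
        rw [pv_cond_eq]; simpa using hb
      have hbf : (PySem.Str.upper (PySem.Str.slice (PySem.Str.strip l) none (some 5)) == "FROM ") = false := by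
        simpa using hb
      simp only [ha, Bool.false_eq_true, if_false, hbf]
      exact ih

-- ---------- the common per-line value, char level ----------

def pvFAc (lc : List Char) : Option String :=
  if ((PySem.Chars.strip lc).take 5).map PySem.Chars.upperChar = ['F','R','O','M',' '] then
    some (String.ofList ((PySem.List.pyGet? (PySem.Chars.split₀ (PySem.Chars.strip lc)) 1).getD []))
  else none

-- A's per-line function (as exposed by pv_loop_eq) is pvFAc
theorem pv_line_eq_FAc (lc : List Char) :
    (if PySem.Str.upper (PySem.Str.slice (PySem.Str.strip (String.ofList lc)) none (some 5)) == "FROM "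
     then some ((PySem.List.pyGet? (PySem.Str.split₀ (PySem.Str.strip (String.ofList lc))) 1).getD "")
     else none) = pvFAc lc := by
  have hline : (PySem.Str.strip (String.ofList lc)).toList = PySem.Chars.strip lc := by
    rw [PySem.Str.toList_strip, String.toList_ofList]
  have hcond : ((PySem.Str.upper (PySem.Str.slice (PySem.Str.strip (String.ofList lc)) none (some 5)) == "FROM ") = true)
      ↔ ((PySem.Chars.strip lc).take 5).map PySem.Chars.upperChar = ['F','R','O','M',' '] := by
    rw [beq_iff_eq, ← String.toList_inj, PySem.Str.toList_upper, PySem.Str.toList_slice,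
        PySem.Chars.slice_eq_listSlice,
        PySem.List.slice_to (xs := (PySem.Str.strip (String.ofList lc)).toList) (b := 5) (by norm_num),
        show ((5:Int).toNat) = 5 from rfl, hline]
    unfold PySem.Chars.upper
    rw [show ("FROM ".toList) = ['F','R','O','M',' '] from rfl]
  have hval : ((PySem.List.pyGet? (PySem.Str.split₀ (PySem.Str.strip (String.ofList lc))) 1).getD "")
      = String.ofList ((PySem.List.pyGet? (PySem.Chars.split₀ (PySem.Chars.strip lc)) 1).getD []) := by
    have hsp : List.map String.toList (PySem.Str.split₀ (PySem.Str.strip (String.ofList lc)))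
        = PySem.Chars.split₀ (PySem.Chars.strip lc) := by
      rw [PySem.Str.split₀_map_toList, hline]
    rw [PySem.List.pyGet?_ofNat', PySem.List.pyGet?_ofNat', ← hsp, List.getElem?_map]
    cases h1 : (PySem.Str.split₀ (PySem.Str.strip (String.ofList lc)))[1]? with
    | none => rfl
    | some y => simp [String.ofList_toList]
  unfold pvFAc
  by_cases hc : ((PySem.Chars.strip lc).take 5).map PySem.Chars.upperChar = ['F','R','O','M',' ']
  · rw [if_pos (hcond.mpr hc), if_pos hc, hval]
  · rw [if_neg (fun h => hc (hcond.mp h)), if_neg hc]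

-- A, assembled: findSome? of pvFAc over the lines of the stripped input
set_option maxHeartbeats 1000000 in
theorem pv_A_eq (c : String) :
    extract_base_image_py c = List.findSome? pvFAc (pvLines [] (PySem.Chars.strip c.toList)) := by
  unfold extract_base_image_py
  rw [pv_loop_eq]
  have hsplit : (PySem.Str.split? (PySem.Str.strip c) "\n").getD []
      = List.map String.ofList (pvLines [] (PySem.Chars.strip c.toList)) := by
    simp only [PySem.Str.split?, PySem.Chars.split?]
    rw [show (("\n" : String).toList) = ['\n'] from rfl]
    rw [if_neg (by simp)]
    simp only [Option.map_some, Option.getD_some, PySem.Str.toList_strip]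
    rw [pv_splitOn_nl]
  rw [hsplit, List.map_map, List.findSome?_map]
  refine congrArg (fun g => List.findSome? g (pvLines [] (PySem.Chars.strip c.toList))) ?_
  funext lc
  simp only [Function.comp_apply]
  exact pv_line_eq_FAc lc

-- ---------- B-side groundwork ----------

theorem pvToken_eq (s : List Char) :
    pvToken s = s.takeWhile (fun c => !PySem.Chars.isspace c) := by
  induction s with
  | nil => rfl
  | cons c t ih =>
    simp only [pvToken, List.takeWhile_cons]
    by_cases h : PySem.Chars.isspace c = true <;> simp [h, ih]

-- the token never crosses the end of the line
theorem pv_takeWhile_stop (u r : List Char)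
    (hr : r = [] ∨ ∃ rt, r = '\n' :: rt) :
    (u ++ r).takeWhile (fun c => !PySem.Chars.isspace c)
      = u.takeWhile (fun c => !PySem.Chars.isspace c) := by
  induction u with
  | nil =>
    rcases hr with rfl | ⟨rt, rfl⟩
    · rfl
    · simp [PySem.Chars.isspace]
  | cons c t ih =>
    simp only [List.cons_append, List.takeWhile_cons]
    by_cases h : PySem.Chars.isspace c = true <;> simp [h, ih]

-- the indentation skip stops inside the line or at its terminating newline
theorem pv_skipws_split (l r : List Char) (hl : ∀ c ∈ l, c ≠ '\n')
    (hr : r = [] ∨ ∃ rt, r = '\n' :: rt) :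
    pvSkipWS (l ++ r) = l.dropWhile PySem.Chars.isspace ++ r := by
  induction l with
  | nil =>
    rcases hr with rfl | ⟨rt, rfl⟩
    · rfl
    · simp [pvSkipWS]
  | cons c t ih =>
    have hc : c ≠ '\n' := hl c (by simp)
    have hcb : (c != '\n') = true := by simpa using hc
    simp only [List.cons_append, pvSkipWS, List.dropWhile_cons, hcb, Bool.true_and]
    by_cases h : PySem.Chars.isspace c = true
    · simp only [h, if_true]
      exact ih (fun d hd => hl d (by simp [hd]))
    · simp [h]

theorem pv_skipline_nonl (l r : List Char) (hl : ∀ c ∈ l, c ≠ '\n') :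
    pvSkipLine (l ++ r) = pvSkipLine r := by
  induction l with
  | nil => rfl
  | cons c t ih =>
    have hc : c ≠ '\n' := hl c (by simp)
    simp only [List.cons_append, pvSkipLine]
    rw [if_neg (by simpa using hc)]
    exact ih (fun d hd => hl d (by simp [hd]))

-- ---------- rstrip / lstrip algebra ----------

theorem pv_rstrip_ws_append (x w : List Char) (hw : ∀ c ∈ w, PySem.Chars.isspace c = true) :
    PySem.Chars.rstrip (x ++ w) = PySem.Chars.rstrip x := by
  unfold PySem.Chars.rstrip
  rw [List.reverse_append, List.dropWhile_append]
  rw [if_pos]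
  rw [List.isEmpty_iff, List.dropWhile_eq_nil_iff]
  intro d hd
  exact hw d (by simpa using hd)

theorem pv_rstrip_append_nonws (x w : List Char) (hw : ∃ c ∈ w, PySem.Chars.isspace c = false) :
    PySem.Chars.rstrip (x ++ w) = x ++ PySem.Chars.rstrip w := by
  unfold PySem.Chars.rstrip
  rw [List.reverse_append, List.dropWhile_append]
  rw [if_neg, List.reverse_append, List.reverse_reverse]
  rw [List.isEmpty_iff, List.dropWhile_eq_nil_iff]
  intro hall
  obtain ⟨d, hd, hdw⟩ := hw
  exact absurd (hall d (by simpa using hd)) (by simp [hdw])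

theorem pv_rstrip_nonws (x : List Char) (hx : ∀ c ∈ x, PySem.Chars.isspace c = false) :
    PySem.Chars.rstrip x = x := by
  unfold PySem.Chars.rstrip
  have h0 : List.dropWhile PySem.Chars.isspace x.reverse = x.reverse := by
    rw [List.dropWhile_eq_self_iff]
    intro hl
    have hm : x.reverse[0] ∈ x := by
      have : x.reverse[0] ∈ x.reverse := List.getElem_mem hl
      simp only [List.mem_reverse] at this
      exact this
    have := hx _ hm
    simp only [List.getElem_reverse] at this
    simpa using this
  rw [h0, List.reverse_reverse]

theorem pv_rstrip_prefix (x : List Char) : PySem.Chars.rstrip x <+: x := by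
  unfold PySem.Chars.rstrip
  have h := List.dropWhile_suffix (l := x.reverse) (p := PySem.Chars.isspace)
  have := h.reverse
  simpa using this

theorem pv_rstrip_length_le (x : List Char) :
    (PySem.Chars.rstrip x).length ≤ x.length := by
  have := (pv_rstrip_prefix x).length_le
  simpa using this

-- every list is its rstrip plus an all-whitespace tail
theorem pv_rstrip_decomp (z : List Char) :
    z = PySem.Chars.rstrip z ++ (z.reverse.takeWhile PySem.Chars.isspace).reverse
      ∧ ∀ c ∈ (z.reverse.takeWhile PySem.Chars.isspace).reverse, PySem.Chars.isspace c = true := by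
  constructor
  · conv_lhs => rw [← List.reverse_reverse z, ← List.takeWhile_append_dropWhile
      (p := PySem.Chars.isspace) (l := z.reverse)]
    rw [List.reverse_append]
    rfl
  · intro c hc
    exact List.mem_takeWhile_imp (by simpa using hc)

theorem pv_split₀_ws_suffix (s w : List Char) (hw : ∀ c ∈ w, PySem.Chars.isspace c = true) :
    PySem.Chars.split₀ (s ++ w) = PySem.Chars.split₀ s := by
  unfold PySem.Chars.split₀
  exact pv_go_ws_suffix s w hw [] []

theorem pv_split₀_rstrip (z : List Char) :
    PySem.Chars.split₀ (PySem.Chars.rstrip z) = PySem.Chars.split₀ z := by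
  obtain ⟨hz, hw⟩ := pv_rstrip_decomp z
  conv_rhs => rw [hz]
  rw [pv_split₀_ws_suffix _ _ hw]

-- ---------- pvFAc under whitespace padding ----------

theorem pvFAc_congr (a b : List Char) (h : PySem.Chars.strip a = PySem.Chars.strip b) :
    pvFAc a = pvFAc b := by
  unfold pvFAc
  rw [h]

theorem pv_strip_ws_cons (c : Char) (l : List Char) (hc : PySem.Chars.isspace c = true) :
    PySem.Chars.strip (c :: l) = PySem.Chars.strip l := by
  unfold PySem.Chars.strip PySem.Chars.lstrip
  rw [List.dropWhile_cons_of_pos hc]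

theorem pv_strip_ws_concat (c : Char) (l : List Char) (hc : PySem.Chars.isspace c = true) :
    PySem.Chars.strip (l ++ [c]) = PySem.Chars.strip l := by
  unfold PySem.Chars.strip PySem.Chars.lstrip
  rw [List.dropWhile_append]
  by_cases h : (List.dropWhile PySem.Chars.isspace l).isEmpty
  · rw [if_pos h]
    rw [List.isEmpty_iff] at h
    rw [h, List.dropWhile_cons_of_pos hc]
    rfl
  · rw [if_neg h]
    exact pv_rstrip_ws_append _ _ (by simp [hc])

theorem pv_strip_allws (l : List Char) (hl : ∀ c ∈ l, PySem.Chars.isspace c = true) :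
    PySem.Chars.strip l = [] := by
  unfold PySem.Chars.strip PySem.Chars.lstrip
  rw [List.dropWhile_eq_nil_iff.mpr hl]
  rfl

theorem pvFAc_allws_none (l : List Char) (hl : ∀ c ∈ l, PySem.Chars.isspace c = true) :
    pvFAc l = none := by
  unfold pvFAc
  rw [pv_strip_allws l hl]
  simp

theorem pvFAc_ws_prefix (w l : List Char) (hw : ∀ c ∈ w, PySem.Chars.isspace c = true) :
    pvFAc (w ++ l) = pvFAc l := by
  induction w with
  | nil => simp
  | cons c t ih =>
    rw [List.cons_append, pvFAc_congr _ _ (pv_strip_ws_cons c (t ++ l) (hw c (by simp)))]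
    exact ih (fun d hd => hw d (by simp [hd]))

-- ---------- pvLines structure ----------

theorem pvLines_ne_nil (s : List Char) : ∀ pre, pvLines pre s ≠ [] := by
  induction s with
  | nil => intro pre; simp [pvLines]
  | cons c t ih =>
    intro pre
    simp only [pvLines]
    split
    · simp
    · exact ih _

theorem pvLines_no_nl (l : List Char) (hl : ∀ c ∈ l, c ≠ '\n') :
    ∀ pre, pvLines pre l = [pre ++ l] := by
  induction l with
  | nil => intro pre; simp [pvLines]
  | cons c t ih =>
    intro pre
    simp only [pvLines]
    rw [if_neg (hl c (by simp))]
    rw [ih (fun d hd => hl d (by simp [hd]))]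
    simp

theorem pvLines_line (l : List Char) (hl : ∀ c ∈ l, c ≠ '\n') :
    ∀ pre rt, pvLines pre (l ++ '\n' :: rt) = (pre ++ l) :: pvLines [] rt := by
  induction l with
  | nil => intro pre rt; simp [pvLines]
  | cons c t ih =>
    intro pre rt
    simp only [List.cons_append, pvLines]
    rw [if_neg (hl c (by simp))]
    rw [ih (fun d hd => hl d (by simp [hd]))]
    simp

theorem pvLines_pre (s : List Char) : ∀ pre,
    pvLines pre s = (pvLines [] s).modifyHead (pre ++ ·) := by
  induction s with
  | nil => intro pre; simp [pvLines]
  | cons c t ih =>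
    intro pre
    simp only [pvLines]
    by_cases hc : c = '\n'
    · simp [hc]
    · rw [if_neg hc, if_neg hc]
      simp only [List.nil_append]
      rw [ih (pre ++ [c]), ih [c], List.modifyHead_modifyHead]
      congr 1
      funext x
      simp

theorem pvLines_append (s : List Char) : ∀ (t : List Char) (pre : List Char),
    pvLines pre (s ++ t)
      = (pvLines pre s).dropLast ++ pvLines ((pvLines pre s).getLastD []) t := by
  induction s with
  | nil => intro t pre; simp [pvLines]
  | cons c s' ih =>
    intro t pre
    by_cases hc : c = '\n'
    · subst hc
      simp only [List.cons_append, pvLines, if_true]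
      have hne := pvLines_ne_nil s' ([] : List Char)
      rw [ih t []]
      rw [List.dropLast_cons_of_ne_nil hne]
      rw [List.cons_append]
      congr 2
      cases h : pvLines [] s' with
      | nil => exact absurd h hne
      | cons a l => simp
    · simp only [List.cons_append, pvLines, if_neg hc]
      exact ih t (pre ++ [c])

theorem pv_lines_allws (w : List Char) : ∀ pre, (∀ c ∈ w, PySem.Chars.isspace c = true) →
    (∀ c ∈ pre, PySem.Chars.isspace c = true) →
    ∀ L ∈ pvLines pre w, ∀ c ∈ L, PySem.Chars.isspace c = true := by
  induction w with
  | nil =>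
    intro pre _ hpre L hL
    simp only [pvLines, List.mem_singleton] at hL
    subst hL; exact hpre
  | cons c t ih =>
    intro pre hw hpre L hL
    by_cases hc : c = '\n'
    · subst hc
      simp only [pvLines, if_true, List.mem_cons] at hL
      rcases hL with rfl | hL
      · exact hpre
      · exact ih [] (fun d hd => hw d (by simp [hd])) (by simp) L hL
    · simp only [pvLines, if_neg hc] at hL
      refine ih (pre ++ [c]) (fun d hd => hw d (by simp [hd])) ?_ L hL
      intro d hd
      rcases List.mem_append.mp hd with h | h
      · exact hpre d h
      · simp only [List.mem_singleton] at h
        subst h; exact hw d (by simp)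

-- ---------- findSome? pvFAc over pvLines is invariant under outer strip ----------

-- an all-whitespace rest of input only ever re-offers the pending line
theorem pv_T (w : List Char) (hw : ∀ c ∈ w, PySem.Chars.isspace c = true) :
    ∀ L, List.findSome? pvFAc (pvLines L w) = pvFAc L := by
  induction w with
  | nil => intro L; simp [pvLines]
  | cons c t ih =>
    intro L
    have hc : PySem.Chars.isspace c = true := hw c (by simp)
    have iht := ih (fun d hd => hw d (by simp [hd]))
    by_cases hnl : c = '\n'
    · subst hnl
      simp only [pvLines, if_true, List.findSome?_cons]
      have h0 : pvFAc ([] : List Char) = none := pvFAc_allws_none [] (by simp)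
      cases hL : pvFAc L with
      | some w => simp
      | none => simp [iht [], h0]
    · simp only [pvLines, if_neg hnl]
      rw [iht (L ++ [c])]
      exact pvFAc_congr _ _ (pv_strip_ws_concat c L hc)

theorem pv_R_ws_suffix (x w : List Char) (hw : ∀ c ∈ w, PySem.Chars.isspace c = true) :
    List.findSome? pvFAc (pvLines [] (x ++ w)) = List.findSome? pvFAc (pvLines [] x) := by
  rw [pvLines_append x w []]
  rw [List.findSome?_append]
  have hLx := pvLines_ne_nil x ([] : List Char)
  conv_rhs => rw [← List.dropLast_concat_getLast hLx, List.findSome?_append]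
  congr 1
  rw [pv_T w hw]
  simp only [List.findSome?_cons, List.findSome?_nil]
  rw [List.getLastD_eq_getLast?, List.getLast?_eq_some_getLast hLx]
  simp only [Option.getD_some]
  cases pvFAc ((pvLines [] x).getLast hLx) <;> simp

theorem pv_R_ws_prefix (w x : List Char) (hw : ∀ c ∈ w, PySem.Chars.isspace c = true) :
    List.findSome? pvFAc (pvLines [] (w ++ x)) = List.findSome? pvFAc (pvLines [] x) := by
  rw [pvLines_append w x []]
  rw [List.findSome?_append]
  have hall : ∀ L ∈ pvLines [] w, ∀ c ∈ L, PySem.Chars.isspace c = true :=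
    pv_lines_allws w [] hw (by simp)
  have h1 : List.findSome? pvFAc (pvLines [] w).dropLast = none := by
    rw [List.findSome?_eq_none_iff]
    intro L hL
    exact pvFAc_allws_none L (hall L (List.dropLast_sublist _ |>.mem hL))
  rw [h1]
  have hlast : ∀ c ∈ (pvLines [] w).getLastD [], PySem.Chars.isspace c = true := by
    intro c hc
    have hLw := pvLines_ne_nil w ([] : List Char)
    rw [List.getLastD_eq_getLast?, List.getLast?_eq_some_getLast hLw] at hc
    exact hall _ (List.getLast_mem hLw) c (by simpa using hc)
  rw [pvLines_pre x ((pvLines [] w).getLastD [])]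
  have hLx := pvLines_ne_nil x ([] : List Char)
  cases hx : pvLines [] x with
  | nil => exact absurd hx hLx
  | cons a l =>
    simp only [List.modifyHead_cons, List.findSome?_cons, Option.none_or]
    rw [pvFAc_ws_prefix _ _ hlast]

theorem pv_R_strip (s : List Char) :
    List.findSome? pvFAc (pvLines [] (PySem.Chars.strip s))
      = List.findSome? pvFAc (pvLines [] s) := by
  unfold PySem.Chars.strip
  obtain ⟨hz, hws⟩ := pv_rstrip_decomp (PySem.Chars.lstrip s)
  have h1 : List.findSome? pvFAc (pvLines [] (PySem.Chars.rstrip (PySem.Chars.lstrip s)))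
      = List.findSome? pvFAc (pvLines [] (PySem.Chars.lstrip s)) := by
    conv_rhs => rw [hz]
    rw [pv_R_ws_suffix _ _ hws]
  have h2 : List.findSome? pvFAc (pvLines [] (PySem.Chars.lstrip s))
      = List.findSome? pvFAc (pvLines [] s) := by
    conv_rhs => rw [← List.takeWhile_append_dropWhile (p := PySem.Chars.isspace) (l := s)]
    exact (pv_R_ws_prefix _ _ (fun c hc => List.mem_takeWhile_imp hc)).symm
  rw [h1, h2]

-- ---------- the FROM attempt, re-read off the first five characters ----------

theorem pv_dropWhile_head {α : Type} (p : α → Bool) (l : List α) (x : α) (u : List α)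
    (h : List.dropWhile p l = x :: u) : p x = false := by
  induction l with
  | nil => simp at h
  | cons c t ih =>
    rw [List.dropWhile_cons] at h
    split at h
    · exact ih h
    · cases h
      simpa using ‹¬p x = true›

theorem pvLineTry_char (s1 : List Char) :
    pvLineTry s1
      = if (s1.take 5).map PySem.Chars.upperChar = ['F','R','O','M',' '] then
          (match pvSkipWS (s1.drop 5) with
           | [] => none
           | x :: u => if x == '\n' then none else some (String.ofList (pvToken (x :: u))))
        else none := by
  match s1 with
  | [] => simp [pvLineTry]
  | [a] => simp [pvLineTry]
  | [a,b] => simp [pvLineTry]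
  | [a,b,c] => simp [pvLineTry]
  | [a,b,c,d] => simp [pvLineTry]
  | a :: b :: c :: d :: e :: t =>
    have ht5 : (a :: b :: c :: d :: e :: t).take 5 = [a,b,c,d,e] := rfl
    have hd5 : (a :: b :: c :: d :: e :: t).drop 5 = t := rfl
    rw [ht5, hd5]
    simp only [pvLineTry, List.map_cons, List.map_nil]
    have hiff : ([a,b,c,d].map PySem.Chars.upperChar = ['F','R','O','M'] ∧ e = ' ')
        ↔ [PySem.Chars.upperChar a, PySem.Chars.upperChar b, PySem.Chars.upperChar c,
           PySem.Chars.upperChar d, PySem.Chars.upperChar e] = ['F','R','O','M',' '] := by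
      constructor
      · rintro ⟨h1, rfl⟩
        simp only [List.map_cons, List.map_nil, List.cons.injEq, and_true] at h1 ⊢
        exact ⟨h1.1, h1.2.1, h1.2.2.1, h1.2.2.2, by decide⟩
      · intro h
        simp only [List.cons.injEq, and_true] at h
        obtain ⟨h1, h2, h3, h4, h5⟩ := h
        exact ⟨by simp [h1, h2, h3, h4], pv_upperChar_eq_space e h5⟩
    by_cases hP : [a,b,c,d].map PySem.Chars.upperChar = ['F','R','O','M'] ∧ e = ' '
    · have hP' : [PySem.Chars.upperChar a, PySem.Chars.upperChar b, PySem.Chars.upperChar c,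
          PySem.Chars.upperChar d] = ['F','R','O','M'] ∧ e = ' ' := by simpa using hP
      rw [if_pos hP', if_pos (hiff.mp hP)]
    · have hP' : ¬ ([PySem.Chars.upperChar a, PySem.Chars.upperChar b, PySem.Chars.upperChar c,
          PySem.Chars.upperChar d] = ['F','R','O','M'] ∧ e = ' ') := by
        simpa using hP
      rw [if_neg hP', if_neg (fun h => hP (hiff.mpr h))]

-- ---------- the per-line step: B's in-place attempt equals A's per-line value ----------

set_option maxHeartbeats 1000000 in
theorem pv_core (l r : List Char) (hl : ∀ c ∈ l, c ≠ '\n')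
    (hr : r = [] ∨ ∃ rt, r = '\n' :: rt) :
    pvLineTry (l.dropWhile PySem.Chars.isspace ++ r) = pvFAc l := by
  have hstrip : PySem.Chars.strip l = PySem.Chars.rstrip (l.dropWhile PySem.Chars.isspace) := rfl
  set l1 := l.dropWhile PySem.Chars.isspace with hl1def
  have hl1 : ∀ c ∈ l1, c ≠ '\n' := fun c hc => hl c ((List.dropWhile_suffix _).subset hc)
  rw [pvLineTry_char]
  obtain hshort | ⟨a, b, c, d, e, t, hsh⟩ :
      l1.length < 5 ∨ ∃ a b c d e t, l1 = a :: b :: c :: d :: e :: t := by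
    rcases l1 with _ | ⟨a, l⟩; · left; simp
    rcases l with _ | ⟨b, l⟩; · left; simp
    rcases l with _ | ⟨c, l⟩; · left; simp
    rcases l with _ | ⟨d, l⟩; · left; simp
    rcases l with _ | ⟨e, l⟩; · left; simp
    exact Or.inr ⟨a, b, c, d, e, l, rfl⟩
  · -- short stripped line: no room for 'FROM ', both sides are none
    have hne2 : pvFAc l = none := by
      unfold pvFAc
      rw [if_neg]
      intro h
      have hlen := congrArg List.length h
      simp only [List.length_map, List.length_take, List.length_cons, List.length_nil] at hlen
      have h1 : (PySem.Chars.strip l).length ≤ l1.length := by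
        rw [hstrip]; exact pv_rstrip_length_le l1
      omega
    rw [hne2, if_neg]
    intro heq
    rcases hr with rfl | ⟨rt, rfl⟩
    · have hlen := congrArg List.length heq
      simp only [List.length_map, List.length_take, List.length_append, List.length_nil,
        List.length_cons] at hlen
      omega
    · have h2 := congrArg (fun L => L[l1.length]?) heq
      simp only [List.getElem?_map] at h2
      have h3 : ((l1 ++ '\n' :: rt).take 5)[l1.length]? = some '\n' := by
        rw [List.getElem?_take_of_lt hshort]
        rw [List.getElem?_append_right (le_refl _)]
        simp
      rw [h3] at h2
      have h4 : l1.length < 5 := hshort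
      interval_cases h : l1.length <;> exact absurd h2 (by decide)
  · -- the stripped line carries at least five characters
    rw [hsh]
    have htake : ((a :: b :: c :: d :: e :: t) ++ r).take 5 = [a, b, c, d, e] := rfl
    have hdrop : ((a :: b :: c :: d :: e :: t) ++ r).drop 5 = t ++ r := rfl
    rw [htake, hdrop]
    have hlt : ∀ x ∈ t, x ≠ '\n' := fun x hx => hl1 x (by rw [hsh]; simp [hx])
    by_cases hC : [a, b, c, d, e].map PySem.Chars.upperChar = ['F', 'R', 'O', 'M', ' '] 
    · -- a FROM directive starts the stripped line
      simp only [List.map_cons, List.map_nil, List.cons.injEq, and_true] at hC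
      obtain ⟨hCa, hCb, hCc, hCd, hCe⟩ := hC
      have he : e = ' ' := pv_upperChar_eq_space e hCe
      subst he
      have ha : PySem.Chars.isspace a = false := by
        rw [← pv_isspace_upperChar a, hCa]; decide
      have hb : PySem.Chars.isspace b = false := by
        rw [← pv_isspace_upperChar b, hCb]; decide
      have hc : PySem.Chars.isspace c = false := by
        rw [← pv_isspace_upperChar c, hCc]; decide
      have hd : PySem.Chars.isspace d = false := by
        rw [← pv_isspace_upperChar d, hCd]; decide
      have habcd : ∀ x ∈ [a, b, c, d], PySem.Chars.isspace x = false := by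
        intro x hx
        simp only [List.mem_cons, List.not_mem_nil, or_false] at hx
        rcases hx with rfl | rfl | rfl | rfl
        · exact ha
        · exact hb
        · exact hc
        · exact hd
      rw [if_pos (by simp [hCa, hCb, hCc, hCd, hCe])]
      rw [pv_skipws_split t r hlt hr]
      cases hu : t.dropWhile PySem.Chars.isspace with
      | nil =>
        -- nothing after 'FROM ': A's stripped line is just the four letters
        have htws : ∀ x ∈ t, PySem.Chars.isspace x = true := List.dropWhile_eq_nil_iff.mp hu
        have hstrip2 : PySem.Chars.strip l = [a, b, c, d] := by
          rw [hstrip, hsh]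
          rw [show a :: b :: c :: d :: ' ' :: t = [a, b, c, d] ++ (' ' :: t) from rfl]
          rw [pv_rstrip_ws_append [a, b, c, d] (' ' :: t) ?_]
          · exact pv_rstrip_nonws _ habcd
          · intro x hx
            rcases List.mem_cons.mp hx with rfl | hx
            · decide
            · exact htws x hx
        have hFA : pvFAc l = none := by
          unfold pvFAc
          rw [hstrip2, if_neg]
          intro h
          exact absurd (congrArg List.length h) (by simp)
        rw [hFA]
        rcases hr with rfl | ⟨rt, rfl⟩
        · rfl
        · simp
      | cons x u' =>
        have hxws : PySem.Chars.isspace x = false := pv_dropWhile_head _ t x u' hu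
        have hxt : x ∈ t := (List.dropWhile_suffix _).subset (by rw [hu]; simp)
        have hxnl : x ≠ '\n' := hlt x hxt
        simp only [List.cons_append]
        rw [if_neg (by simpa using hxnl)]
        -- the returned token
        rw [pvToken_eq]
        rw [show x :: (u' ++ r) = (x :: u') ++ r from rfl]
        rw [pv_takeWhile_stop (x :: u') r hr]
        -- A's side: strip keeps the directive and the token
        have hex : ∃ y ∈ ' ' :: t, PySem.Chars.isspace y = false := by
          refine ⟨x, by simp [hxt], hxws⟩
        have hext : ∃ y ∈ t, PySem.Chars.isspace y = false := ⟨x, hxt, hxws⟩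
        have hstrip3 : PySem.Chars.strip l = [a, b, c, d] ++ ' ' :: PySem.Chars.rstrip t := by
          rw [hstrip, hsh]
          rw [show a :: b :: c :: d :: ' ' :: t = [a, b, c, d] ++ ([' '] ++ t) from rfl]
          rw [pv_rstrip_append_nonws [a, b, c, d] ([' '] ++ t) (by simpa using hex)]
          rw [pv_rstrip_append_nonws [' '] t hext]
          rfl
        unfold pvFAc
        rw [hstrip3, if_pos (by simp [hCa, hCb, hCc, hCd, hCe])]
        -- split₀ of A's stripped line
        have hsp1 : PySem.Chars.split₀ ([a, b, c, d] ++ ' ' :: PySem.Chars.rstrip t)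
            = [a, b, c, d] :: PySem.Chars.split₀ t := by
          rw [pv_split₀_word_ws [a, b, c, d] ' ' _ (by simp) habcd (by decide)]
          rw [pv_split₀_rstrip]
        rw [hsp1]
        have hsp2 : PySem.Chars.split₀ t = PySem.Chars.split₀ (x :: u') := by
          conv_lhs => rw [← List.takeWhile_append_dropWhile (p := PySem.Chars.isspace) (l := t)]
          rw [hu, pv_split₀_ws_prefix _ _ (fun y hy => List.mem_takeWhile_imp hy)]
        rw [hsp2]
        -- first word of what follows the directive
        have hw : PySem.Chars.split₀ (x :: u')
            = (x :: u').takeWhile (fun y => !PySem.Chars.isspace y)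
              :: PySem.Chars.split₀ ((x :: u').dropWhile (fun y => !PySem.Chars.isspace y)).tail
            ∨ (PySem.Chars.split₀ (x :: u')
                = [(x :: u').takeWhile (fun y => !PySem.Chars.isspace y)]
               ∧ (x :: u').dropWhile (fun y => !PySem.Chars.isspace y) = []) := by
          cases hv : (x :: u').dropWhile (fun y => !PySem.Chars.isspace y) with
          | nil =>
            refine Or.inr ⟨?_, rfl⟩
            have hall : ∀ y ∈ x :: u', PySem.Chars.isspace y = false := by
              intro y hy
              have := List.dropWhile_eq_nil_iff.mp hv y hy
              simpa using this
            rw [List.takeWhile_eq_self_iff.mpr (by intro y hy; simp [hall y hy])]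
            exact pv_split₀_single _ (by simp) hall
          | cons y v' =>
            refine Or.inl ?_
            have hyws : PySem.Chars.isspace y = true := by
              have := pv_dropWhile_head _ (x :: u') y v' hv
              simpa using this
            conv_lhs => rw [← List.takeWhile_append_dropWhile
              (p := fun y => !PySem.Chars.isspace y) (l := x :: u'), hv]
            rw [pv_split₀_word_ws _ y v' ?_ ?_ hyws]
            · rfl
            · intro hemp
              rw [List.takeWhile_eq_nil_iff] at hemp
              exact absurd (by simpa using hemp (by simp)) (by simp [hxws])
            · intro z hz
              have := List.mem_takeWhile_imp hz
              simpa using this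
        rcases hw with hw | ⟨hw, -⟩ <;>
          · rw [hw]
            rw [PySem.List.pyGet?_ofNat']
            simp
    · rw [if_neg hC]
      unfold pvFAc
      rw [if_neg]
      intro h
      have h5len : 5 ≤ (PySem.Chars.strip l).length := by
        have hlen := congrArg List.length h
        simp only [List.length_map, List.length_take, List.length_cons, List.length_nil] at hlen
        omega
      obtain ⟨z, hz⟩ := pv_rstrip_prefix l1
      have htk : (PySem.Chars.strip l).take 5 = l1.take 5 := by
        conv_rhs => rw [← hz]
        rw [hstrip]
        rw [List.take_append_of_le_length (by rw [hstrip] at h5len; exact h5len)]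
      have hC' : (l1.take 5).map PySem.Chars.upperChar = ['F', 'R', 'O', 'M', ' '] := by
        rw [← htk]; exact h
      rw [hsh] at hC'
      exact hC (by simpa using hC')

-- ---------- the whole scan equals A's findSome? over the lines ----------

theorem pv_M (s : List Char) : pvScan s = List.findSome? pvFAc (pvLines [] s) := by
  suffices H : ∀ (n : Nat) (s : List Char), s.length ≤ n
      → pvScan s = List.findSome? pvFAc (pvLines [] s) from H s.length s le_rfl
  intro n
  induction n with
  | zero =>
    intro s hs
    have : s = [] := List.eq_nil_of_length_eq_zero (by omega)
    subst this
    simp only [pvScan, pvLines, List.findSome?_cons, List.findSome?_nil]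
    rw [pvFAc_allws_none [] (by simp)]
  | succ n ih =>
    intro s hs
    cases s with
    | nil =>
      simp only [pvScan, pvLines, List.findSome?_cons, List.findSome?_nil]
      rw [pvFAc_allws_none [] (by simp)]
    | cons c t =>
      set l := (c :: t).takeWhile (fun x => x != '\n') with hldef
      set r := (c :: t).dropWhile (fun x => x != '\n') with hrdef
      have hsplit : c :: t = l ++ r := (List.takeWhile_append_dropWhile).symm
      have hl : ∀ d ∈ l, d ≠ '\n' := by
        intro d hd
        have := List.mem_takeWhile_imp hd
        simpa using this
      have hr : r = [] ∨ ∃ rt, r = '\n' :: rt := by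
        cases hrr : r with
        | nil => exact Or.inl rfl
        | cons x rt =>
          refine Or.inr ⟨rt, ?_⟩
          have := pv_dropWhile_head _ (c :: t) x rt (by rw [← hrdef, hrr])
          have hx : x = '\n' := by simpa using this
          rw [hx]
      have hws : pvSkipWS (c :: t) = l.dropWhile PySem.Chars.isspace ++ r := by
        conv_lhs => rw [hsplit]
        exact pv_skipws_split l r hl hr
      have hl1nl : ∀ d ∈ l.dropWhile PySem.Chars.isspace, d ≠ '\n' :=
        fun d hd => hl d ((List.dropWhile_suffix _).subset hd)
      have hline : pvSkipLine (l.dropWhile PySem.Chars.isspace ++ r) = pvSkipLine r :=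
        pv_skipline_nonl _ r hl1nl
      simp only [pvScan]
      rw [hws, pv_core l r hl hr, hline]
      rcases hr with hre | ⟨rt, hre⟩
      · -- last line of the input
        have hlines : pvLines [] (c :: t) = [l] := by
          rw [hsplit, hre, List.append_nil]
          exact pvLines_no_nl l hl []
        rw [hlines, hre]
        simp only [pvSkipLine, pvScan, List.findSome?_cons, List.findSome?_nil]
        cases pvFAc l <;> rfl
      · -- a newline ends the line: recurse on the rest
        have hlines : pvLines [] (c :: t) = l :: pvLines [] rt := by
          conv_lhs => rw [hsplit, hre]
          exact pvLines_line l hl [] rt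
        have hlen : rt.length ≤ n := by
          have h1 := congrArg List.length hsplit
          rw [hre] at h1
          simp only [List.length_cons, List.length_append] at h1 hs
          omega
        rw [hlines, hre]
        simp only [pvSkipLine, List.findSome?_cons]
        rw [if_pos (by decide), ih rt hlen]
        cases pvFAc l <;> rfl

-- ===== VERDICT (by name: the statement is the Claim_ definition above) =====
theorem extract_base_image_py_spec : Claim_equal_extract_base_image_py := by
  intro c _
  unfold Spec_extract_base_image_py extract_base_image_py_alt
  rw [pv_A_eq c, pv_R_strip, ← pv_M]
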